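-- pv_equiv track=rewrite | github.com/amandamacgregor/battlesnakes-basics | lambdafunction.py | evaluate_move_space
-- ===== SOURCE A (Python) =====
-- def evaluate_move_space(nx, ny, board_width, board_height, obstacles):
--     # Use flood fill to estimate available space from a position.
--     # This helps avoid moves that trap the snake.
--     visited = set()
--     queue = [(nx, ny)]
--     visited.add((nx, ny))
--     space = 0
--     max_iterations = 50  # Limit for performance in Lambda
--
--     while queue and space < max_iterations:
--         cx, cy = queue.pop(0)
--         space += 1
--
--         # Check all 4 directions
--         for dx, dy in [(0, 1), (0, -1), (1, 0), (-1, 0)]: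
--             new_x, new_y = cx + dx, cy + dy
--
--             if (0 <= new_x < board_width and
--                 0 <= new_y < board_height and
--                 (new_x, new_y) not in visited and
--                 (new_x, new_y) not in obstacles):
--                 visited.add((new_x, new_y))
--                 queue.append((new_x, new_y))
--
--     return space
-- ===== SOURCE B (Python) =====
-- def evaluate_move_space(nx, ny, board_width, board_height, obstacles):
--     # Recursive flood fill with an obstacle hash-set; counts at most 50 cells.
--     obs = set(obstacles)
--     visited = {(nx, ny)}
--     count = 0
--
--     def fill(cx, cy):
--         nonlocal count
--         if count >= 50:
--             return
--         count += 1
--         new = []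
--         for nbr in ((cx, cy + 1), (cx, cy - 1), (cx + 1, cy), (cx - 1, cy)):
--             if (0 <= nbr[0] < board_width and 0 <= nbr[1] < board_height
--                     and nbr not in visited and nbr not in obs):
--                 visited.add(nbr)
--                 new.append(nbr)
--         for mx, my in new:
--             fill(mx, my)
--
--     fill(nx, ny)
--     return count
-- ===== Notes on version B (the rewrite author's own statement) =====
-- stated objective: alternative
-- what changed: Replaces the iterative BFS (FIFO queue with pop(0) and per-cell list membership for obstacles) by a recursive depth-first flood fill with a shared counter and an obstacle hash-set; the 50-cap makes the result min(reachable, 50), which is independent of visiting order.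
import Mathlib
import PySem

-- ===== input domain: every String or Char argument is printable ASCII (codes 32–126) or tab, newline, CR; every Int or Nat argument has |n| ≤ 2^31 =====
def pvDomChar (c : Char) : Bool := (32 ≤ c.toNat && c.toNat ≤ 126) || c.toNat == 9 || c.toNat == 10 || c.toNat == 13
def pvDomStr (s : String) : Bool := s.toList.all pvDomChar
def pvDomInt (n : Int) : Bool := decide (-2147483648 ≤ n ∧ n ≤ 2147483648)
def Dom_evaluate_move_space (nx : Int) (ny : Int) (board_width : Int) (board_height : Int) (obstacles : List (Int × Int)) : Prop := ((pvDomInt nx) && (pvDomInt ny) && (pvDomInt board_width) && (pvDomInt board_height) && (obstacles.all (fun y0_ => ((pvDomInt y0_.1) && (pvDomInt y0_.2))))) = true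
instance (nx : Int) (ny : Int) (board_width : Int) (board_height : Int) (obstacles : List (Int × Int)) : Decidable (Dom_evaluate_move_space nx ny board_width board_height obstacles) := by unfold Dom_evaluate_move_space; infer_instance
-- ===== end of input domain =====

-- B replaces A's iterative BFS by a recursive depth-first flood fill with an obstacle hash-set
-- (the 50-cap makes the result min(reachable, 50), independent of visiting order).

-- ===== PORT A =====
-- the literal offset list of A's inner for-loop
def pvOffsets : List (Int × Int) := [(0, 1), (0, -1), (1, 0), (-1, 0)]

-- A's while-loop: state (visited, queue, space); terminates because space grows towards 50
def pvBfsA (w h : Int) (obs : List (Int × Int)) (visited : PySem.Set (Int × Int))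
    (queue : List (Int × Int)) (space : Int) : Int :=
  match queue with
  | [] => space
  | c :: qs =>
    if hlt : space < 50 then
      let st := pvOffsets.foldl
        (fun (st : PySem.Set (Int × Int) × List (Int × Int)) d =>
          let n : Int × Int := (c.1 + d.1, c.2 + d.2)
          if 0 ≤ n.1 ∧ n.1 < w ∧ 0 ≤ n.2 ∧ n.2 < h ∧ n ∉ st.1 ∧ n ∉ obs
          then (PySem.Set.add st.1 n, st.2 ++ [n]) else st)
        (visited, qs)
      pvBfsA w h obs st.1 st.2 (space + 1)
    else space
termination_by (50 - space).toNat
decreasing_by omega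

def evaluate_move_space (nx : Int) (ny : Int) (board_width : Int) (board_height : Int) (obstacles : List (Int × Int)) : Int :=
  pvBfsA board_width board_height obstacles
    (PySem.Set.add PySem.Set.empty (nx, ny)) [(nx, ny)] 0

-- ===== PORT B =====
-- the literal neighbour tuple of B's for-loop
def pvNbrList (c : Int × Int) : List (Int × Int) :=
  [(c.1, c.2 + 1), (c.1, c.2 - 1), (c.1 + 1, c.2), (c.1 - 1, c.2)]

-- B's recursive fill: state (visited, count); fuel only makes the recursion structural
-- (fuel 51 is never exhausted: every recursive level increments count, capped at 50)
mutual
def pvFillB (w h : Int) (obs : PySem.Set (Int × Int)) (fuel : Nat) (c : Int × Int)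
    (st : PySem.Set (Int × Int) × Int) : PySem.Set (Int × Int) × Int :=
  match fuel with
  | 0 => st
  | fuel + 1 =>
    if 50 ≤ st.2 then st
    else
      let st1 := (pvNbrList c).foldl
        (fun (p : PySem.Set (Int × Int) × List (Int × Int)) n =>
          if 0 ≤ n.1 ∧ n.1 < w ∧ 0 ≤ n.2 ∧ n.2 < h ∧ n ∉ p.1 ∧ n ∉ obs
          then (PySem.Set.add p.1 n, p.2 ++ [n]) else p)
        (st.1, [])
      pvFillListB w h obs fuel st1.2 (st1.1, st.2 + 1)
termination_by (fuel, 0)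

def pvFillListB (w h : Int) (obs : PySem.Set (Int × Int)) (fuel : Nat)
    (cs : List (Int × Int)) (st : PySem.Set (Int × Int) × Int) : PySem.Set (Int × Int) × Int :=
  match cs with
  | [] => st
  | c :: cs' => pvFillListB w h obs fuel cs' (pvFillB w h obs fuel c st)
termination_by (fuel, cs.length + 1)
end

def evaluate_move_space_alt (nx : Int) (ny : Int) (board_width : Int) (board_height : Int) (obstacles : List (Int × Int)) : Int :=
  (pvFillB board_width board_height (PySem.Set.ofList obstacles) 51 (nx, ny)
    (PySem.Set.add PySem.Set.empty (nx, ny), 0)).2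

-- ===== PRECONDITION & SPEC =====
def Spec_evaluate_move_space (nx : Int) (ny : Int) (board_width : Int) (board_height : Int) (obstacles : List (Int × Int)) (out : Int) : Prop := out = evaluate_move_space_alt nx ny board_width board_height obstacles
instance (nx : Int) (ny : Int) (board_width : Int) (board_height : Int) (obstacles : List (Int × Int)) (out : Int) : Decidable (Spec_evaluate_move_space nx ny board_width board_height obstacles out) := by unfold Spec_evaluate_move_space; infer_instance

-- ===== CLAIM (what is proved, stated in full; the proofs are below) =====
def Claim_equal_evaluate_move_space : Prop := ∀ (nx : Int) (ny : Int) (board_width : Int) (board_height : Int) (obstacles : List (Int × Int)), Dom_evaluate_move_space nx ny board_width board_height obstacles → Spec_evaluate_move_space nx ny board_width board_height obstacles (evaluate_move_space nx ny board_width board_height obstacles)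

-- ===== LEMMAS AND PROOFS =====

-- a cell is enterable: in bounds and not an obstacle
abbrev pvOk (w h : Int) (obs : List (Int × Int)) (n : Int × Int) : Prop :=
  0 ≤ n.1 ∧ n.1 < w ∧ 0 ≤ n.2 ∧ n.2 < h ∧ n ∉ obs

-- cells reachable from seed set S, where every newly entered cell must be ok and outside V
inductive pvReach (w h : Int) (obs : List (Int × Int)) (S V : Set (Int × Int)) : (Int × Int) → Prop
  | seed {c : Int × Int} : c ∈ S → pvReach w h obs S V c
  | step {c n : Int × Int} : pvReach w h obs S V c → n ∈ pvNbrList c → pvOk w h obs n → n ∉ V →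
      pvReach w h obs S V n

def pvR (w h : Int) (obs : List (Int × Int)) (S V : Set (Int × Int)) : Set (Int × Int) :=
  {x | pvReach w h obs S V x}

theorem pvR_mono (w h : Int) (obs : List (Int × Int)) {S S' V : Set (Int × Int)}
    (hss : S ⊆ S') : pvR w h obs S V ⊆ pvR w h obs S' V := by
  intro x hx
  induction hx with
  | seed hmem => exact pvReach.seed (hss hmem)
  | step _ hn hok hv ih => exact pvReach.step ih hn hok hv

theorem pvR_avoid (w h : Int) (obs : List (Int × Int)) {S V : Set (Int × Int)}
    {x : Int × Int} (hx : x ∈ pvR w h obs S V) (hxV : x ∈ V) : x ∈ S := by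
  revert hxV
  induction hx with
  | seed hmem => exact fun _ => hmem
  | step _ _ _ hv _ => exact fun hxV => absurd hxV hv

theorem pvR_empty (w h : Int) (obs : List (Int × Int)) (V : Set (Int × Int)) :
    pvR w h obs ∅ V = ∅ := by
  ext x
  simp only [Set.mem_empty_iff_false, iff_false]
  intro hx
  induction hx with
  | seed hmem => exact hmem
  | step _ _ _ _ ih => exact ih

theorem pvR_finite (w h : Int) (obs : List (Int × Int)) {S V : Set (Int × Int)}
    (hS : S.Finite) : (pvR w h obs S V).Finite := by
  refine Set.Finite.subset (hS.union ((Set.finite_Icc (0 : Int) (w - 1)).prod (Set.finite_Icc (0 : Int) (h - 1)))) ?_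
  intro x hx
  induction hx with
  | seed hmem => exact Or.inl hmem
  | step _ _ hok _ _ =>
    refine Or.inr ?_
    rw [Set.mem_prod, Set.mem_Icc, Set.mem_Icc]
    obtain ⟨h1, h2, h3, h4, _⟩ := hok
    omega

-- L1: processing one frontier cell c: its fresh ok neighbours N move from "future" to "frontier"
theorem pvR_step (w h : Int) (obs : List (Int × Int)) {S V : Set (Int × Int)} {c : Int × Int}
    (hcV : c ∈ V) (hcS : c ∉ S) :
    pvR w h obs (insert c S) V
      = insert c (pvR w h obs (S ∪ {n | n ∈ pvNbrList c ∧ pvOk w h obs n ∧ n ∉ V}) (V ∪ {n | n ∈ pvNbrList c ∧ pvOk w h obs n ∧ n ∉ V}))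
    ∧ c ∉ pvR w h obs (S ∪ {n | n ∈ pvNbrList c ∧ pvOk w h obs n ∧ n ∉ V}) (V ∪ {n | n ∈ pvNbrList c ∧ pvOk w h obs n ∧ n ∉ V}) := by
  set N : Set (Int × Int) := {n | n ∈ pvNbrList c ∧ pvOk w h obs n ∧ n ∉ V} with hN
  have hcmem : c ∉ pvR w h obs (S ∪ N) (V ∪ N) := by
    intro hc
    have hin : c ∈ S ∪ N := pvR_avoid w h obs hc (Or.inl hcV)
    rcases hin with hin | hin
    · exact hcS hin
    · exact hin.2.2 hcV
  refine ⟨?_, hcmem⟩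
  ext x
  constructor
  · intro hx
    induction hx with
    | seed hmem =>
      rcases Set.mem_insert_iff.mp hmem with he | hmem
      · exact he ▸ Set.mem_insert _ _
      · exact Set.mem_insert_iff.mpr (Or.inr (pvReach.seed (Or.inl hmem)))
    | step hr hn hok hv ih =>
      rename_i x' n'
      by_cases hnN : n' ∈ N
      · exact Set.mem_insert_iff.mpr (Or.inr (pvReach.seed (Or.inr hnN)))
      · have hne : x' ≠ c := by
          intro he
          exact hnN ⟨he ▸ hn, hok, hv⟩
        rcases Set.mem_insert_iff.mp ih with he | hx'
        · exact absurd he hne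
        · refine Set.mem_insert_iff.mpr (Or.inr (pvReach.step hx' hn hok ?_))
          intro hmem
          rcases hmem with hmem | hmem
          · exact hv hmem
          · exact hnN hmem
  · have hsub : ∀ y, y ∈ pvR w h obs (S ∪ N) (V ∪ N) → y ∈ pvR w h obs (insert c S) V := by
      intro y hy
      induction hy with
      | seed hmem =>
        rcases hmem with hmem | hmem
        · exact pvReach.seed (Set.mem_insert_iff.mpr (Or.inr hmem))
        · exact pvReach.step (pvReach.seed (Set.mem_insert _ _)) hmem.1 hmem.2.1 hmem.2.2
      | step _ hn hok hv ih =>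
        exact pvReach.step ih hn hok (fun hmem => hv (Or.inl hmem))
    intro hx
    rcases Set.mem_insert_iff.mp hx with he | hx
    · exact he ▸ pvReach.seed (Set.mem_insert _ _)
    · exact hsub _ hx

-- L2: splitting the seed set: explore S fully first, then T avoiding what S reached
theorem pvR_split (w h : Int) (obs : List (Int × Int)) {S T V : Set (Int × Int)}
    (hTV : T ⊆ V) (hST : ∀ x ∈ T, x ∉ S) :
    pvR w h obs (S ∪ T) V = pvR w h obs S V ∪ pvR w h obs T (V ∪ pvR w h obs S V)
    ∧ ∀ x ∈ pvR w h obs T (V ∪ pvR w h obs S V), x ∉ pvR w h obs S V := by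
  have hdisj : ∀ x ∈ pvR w h obs T (V ∪ pvR w h obs S V), x ∉ pvR w h obs S V := by
    intro x hx
    induction hx with
    | seed hmem =>
      intro hxS
      have : _ ∈ S := pvR_avoid w h obs hxS (hTV hmem)
      exact hST _ hmem this
    | step _ _ _ hv _ => exact fun hmem => hv (Or.inr hmem)
  refine ⟨?_, hdisj⟩
  ext x
  constructor
  · intro hx
    induction hx with
    | seed hmem =>
      rcases hmem with hmem | hmem
      · exact Or.inl (pvReach.seed hmem)
      · exact Or.inr (pvReach.seed hmem)
    | step hr hn hok hv ih =>
      rename_i x' n'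
      by_cases hnRS : n' ∈ pvR w h obs S V
      · exact Or.inl hnRS
      · rcases ih with hx' | hx'
        · exact absurd (pvReach.step hx' hn hok hv) hnRS
        · refine Or.inr (pvReach.step hx' hn hok ?_)
          intro hmem
          rcases hmem with hmem | hmem
          · exact hv hmem
          · exact hnRS hmem
  · have hsub : ∀ y, y ∈ pvR w h obs T (V ∪ pvR w h obs S V) → y ∈ pvR w h obs (S ∪ T) V := by
      intro y hy
      induction hy with
      | seed hmem => exact pvReach.seed (Or.inr hmem)
      | step _ hn hok hv ih => exact pvReach.step ih hn hok (fun hmem => hv (Or.inl hmem))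
    intro hx
    rcases hx with hx | hx
    · exact pvR_mono w h obs Set.subset_union_left hx
    · exact hsub _ hx

theorem pvNbrList_nodup (c : Int × Int) : (pvNbrList c).Nodup := by
  simp [pvNbrList, Prod.ext_iff]
  omega

-- the neighbour fold of both ports appends exactly the fresh ok neighbours
theorem pvFold_char (w h : Int) (obs : List (Int × Int))
    (cond : PySem.Set (Int × Int) → (Int × Int) → Prop)
    [inst : ∀ V n, Decidable (cond V n)]
    (hc : ∀ V n, cond V n ↔ (pvOk w h obs n ∧ n ∉ V))
    (L : List (Int × Int)) (hL : L.Nodup) (V : PySem.Set (Int × Int)) (q : List (Int × Int)) :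
    L.foldl (fun st n => if cond st.1 n then (PySem.Set.add st.1 n, st.2 ++ [n]) else st) (V, q)
      = (V ++ L.filter (fun n => decide (pvOk w h obs n ∧ n ∉ V)),
         q ++ L.filter (fun n => decide (pvOk w h obs n ∧ n ∉ V))) := by
  induction L generalizing V q with
  | nil => simp
  | cons n L ih =>
    have hnL : n ∉ L := (List.nodup_cons.mp hL).1
    have hLnd : L.Nodup := (List.nodup_cons.mp hL).2
    rw [List.foldl_cons]
    by_cases hbn : pvOk w h obs n ∧ n ∉ V
    · rw [if_pos ((hc V n).mpr hbn)]
      have hadd : PySem.Set.add V n = V ++ [n] := PySem.Set.add_of_not_mem hbn.2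
      rw [hadd, ih hLnd (V ++ [n]) (q ++ [n])]
      have hfe : L.filter (fun m => decide (pvOk w h obs m ∧ m ∉ V ++ [n]))
          = L.filter (fun m => decide (pvOk w h obs m ∧ m ∉ V)) := by
        apply List.filter_congr
        intro m hm
        have hmn : m ≠ n := fun he => hnL (he ▸ hm)
        simp [hmn]
      have hfc : (n :: L).filter (fun m => decide (pvOk w h obs m ∧ m ∉ V))
          = n :: L.filter (fun m => decide (pvOk w h obs m ∧ m ∉ V)) := by
        rw [List.filter_cons_of_pos (by simpa using hbn)]
      rw [hfe, hfc]
      simp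
    · rw [if_neg (fun hcv => hbn ((hc V n).mp hcv))]
      rw [ih hLnd V q]
      rw [List.filter_cons_of_neg (by simpa using hbn)]

-- characterisation of A's loop: result = min 50 (space + |reachable beyond the frontier|)
theorem pvBfsA_char (w h : Int) (obs : List (Int × Int)) :
    ∀ (V : PySem.Set (Int × Int)) (Q : List (Int × Int)) (s : Int),
    (∀ c ∈ Q, c ∈ V) → Q.Nodup → 0 ≤ s → s ≤ 50 →
    pvBfsA w h obs V Q s
      = min 50 (s + ((pvR w h obs {x | x ∈ Q} {x | x ∈ V}).ncard : Int)) := by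
  intro V Q s
  induction V, Q, s using pvBfsA.induct w h obs with
  | case1 V s =>
    intro _ _ hs0 hs
    rw [pvBfsA]
    have he : ({x : Int × Int | x ∈ ([] : List (Int × Int))}) = (∅ : Set (Int × Int)) := by
      ext x; simp
    rw [he, pvR_empty]
    simp
    omega
  | case2 V s c qs hlt st ih =>
    intro hmem hnd hs0 hs
    have hmap : pvOffsets.map (fun d : Int × Int => ((c.1 + d.1, c.2 + d.2) : Int × Int)) = pvNbrList c := by
      simp [pvOffsets, pvNbrList, sub_eq_add_neg]
    have h1 := pvFold_char w h obs
      (fun (Vs : PySem.Set (Int × Int)) (n : Int × Int) =>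
        0 ≤ n.1 ∧ n.1 < w ∧ 0 ≤ n.2 ∧ n.2 < h ∧ n ∉ Vs ∧ n ∉ obs)
      (by intro Vs n; unfold pvOk; tauto) (pvNbrList c) (pvNbrList_nodup c) V qs
    set N := (pvNbrList c).filter (fun n => decide (pvOk w h obs n ∧ n ∉ V)) with hNdef
    have h2 : (pvOffsets.foldl
        (fun (st : PySem.Set (Int × Int) × List (Int × Int)) d =>
          let n : Int × Int := (c.1 + d.1, c.2 + d.2)
          if 0 ≤ n.1 ∧ n.1 < w ∧ 0 ≤ n.2 ∧ n.2 < h ∧ n ∉ st.1 ∧ n ∉ obs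
          then (PySem.Set.add st.1 n, st.2 ++ [n]) else st)
        (V, qs))
        = (pvNbrList c).foldl
          (fun (st : PySem.Set (Int × Int) × List (Int × Int)) (n : Int × Int) =>
            if 0 ≤ n.1 ∧ n.1 < w ∧ 0 ≤ n.2 ∧ n.2 < h ∧ n ∉ st.1 ∧ n ∉ obs
            then (PySem.Set.add st.1 n, st.2 ++ [n]) else st)
          (V, qs) := by
      rw [← hmap, List.foldl_map]
    have hfold : (pvOffsets.foldl
        (fun (st : PySem.Set (Int × Int) × List (Int × Int)) d =>
          let n : Int × Int := (c.1 + d.1, c.2 + d.2)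
          if 0 ≤ n.1 ∧ n.1 < w ∧ 0 ≤ n.2 ∧ n.2 < h ∧ n ∉ st.1 ∧ n ∉ obs
          then (PySem.Set.add st.1 n, st.2 ++ [n]) else st)
        (V, qs)) = (V ++ N, qs ++ N) := h2.trans h1
    have hst : st = (V ++ N, qs ++ N) := hfold
    rw [pvBfsA, dif_pos hlt]
    simp only [hfold]
    rw [hst] at ih
    have hNmem : ∀ x ∈ N, x ∈ pvNbrList c ∧ pvOk w h obs x ∧ x ∉ V := by
      intro x hx
      have := List.mem_filter.mp hx
      simpa using this
    have hmem' : ∀ x ∈ qs ++ N, x ∈ V ++ N := by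
      intro x hx
      rcases List.mem_append.mp hx with hx | hx
      · exact List.mem_append.mpr (Or.inl (hmem x (List.mem_cons_of_mem c hx)))
      · exact List.mem_append.mpr (Or.inr hx)
    have hnd' : (qs ++ N).Nodup := by
      refine List.Nodup.append (List.nodup_cons.mp hnd).2 (List.Nodup.filter _ (pvNbrList_nodup c)) ?_
      intro x hxqs hxN
      exact (hNmem x hxN).2.2 (hmem x (List.mem_cons_of_mem c hxqs))
    have ih' := ih hmem' hnd' (by omega) (by omega)
    rw [ih']
    -- identify the seed/avoid sets
    have hS1 : {x : Int × Int | x ∈ qs ++ N}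
        = {x : Int × Int | x ∈ qs} ∪ {n | n ∈ pvNbrList c ∧ pvOk w h obs n ∧ n ∉ V} := by
      ext x
      simp [hNdef, List.mem_append, List.mem_filter, Set.mem_setOf_eq, Set.mem_union]
    have hV1 : {x : Int × Int | x ∈ V ++ N}
        = {x : Int × Int | x ∈ V} ∪ {n | n ∈ pvNbrList c ∧ pvOk w h obs n ∧ n ∉ V} := by
      ext x
      simp [hNdef, List.mem_append, List.mem_filter, Set.mem_setOf_eq, Set.mem_union]
    have hcons : {x : Int × Int | x ∈ c :: qs} = insert c {x : Int × Int | x ∈ qs} := by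
      ext x; simp [List.mem_cons]
    have hstep := pvR_step w h obs
      (S := {x : Int × Int | x ∈ qs}) (V := {x : Int × Int | x ∈ V}) (c := c)
      (hmem c (List.mem_cons_self)) (List.nodup_cons.mp hnd).1
    have hfin : (pvR w h obs ({x : Int × Int | x ∈ qs} ∪ {n | n ∈ pvNbrList c ∧ pvOk w h obs n ∧ n ∉ V}) ({x : Int × Int | x ∈ V} ∪ {n | n ∈ pvNbrList c ∧ pvOk w h obs n ∧ n ∉ V})).Finite := by
      refine pvR_finite w h obs ?_
      rw [← hS1]
      exact List.finite_toSet _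
    have hcard : (pvR w h obs {x : Int × Int | x ∈ c :: qs} {x : Int × Int | x ∈ V}).ncard
        = (pvR w h obs ({x : Int × Int | x ∈ qs} ∪ {n | n ∈ pvNbrList c ∧ pvOk w h obs n ∧ n ∉ V}) ({x : Int × Int | x ∈ V} ∪ {n | n ∈ pvNbrList c ∧ pvOk w h obs n ∧ n ∉ V})).ncard + 1 := by
      rw [hcons, hstep.1]
      exact Set.ncard_insert_of_notMem hstep.2 hfin
    rw [hS1, hV1, hcard]
    push_cast
    omega
  | case3 V s c qs hlt =>
    intro hmem hnd hs0 hs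
    rw [pvBfsA, dif_neg hlt]
    have hn : (0 : Int) ≤ ((pvR w h obs {x : Int × Int | x ∈ c :: qs} {x : Int × Int | x ∈ V}).ncard : Int) := by positivity
    omega

-- characterisation of B's fill and fill-list (joint fuel induction)
theorem pvFillB_char (w h : Int) (obs : List (Int × Int)) (fuel : Nat) :
    (∀ (c : Int × Int) (V : PySem.Set (Int × Int)) (s : Int),
      c ∈ V → 0 ≤ s → s ≤ 50 → 51 ≤ fuel + s.toNat →
      (pvFillB w h (PySem.Set.ofList obs) fuel c (V, s)).2
          = min 50 (s + ((pvR w h obs {c} {x | x ∈ V}).ncard : Int))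
        ∧ (∀ x ∈ V, x ∈ (pvFillB w h (PySem.Set.ofList obs) fuel c (V, s)).1)
        ∧ ((pvFillB w h (PySem.Set.ofList obs) fuel c (V, s)).2 < 50 →
            ∀ x, x ∈ (pvFillB w h (PySem.Set.ofList obs) fuel c (V, s)).1
              ↔ x ∈ V ∨ x ∈ pvR w h obs {c} {y | y ∈ V})
        ∧ s ≤ (pvFillB w h (PySem.Set.ofList obs) fuel c (V, s)).2
        ∧ (pvFillB w h (PySem.Set.ofList obs) fuel c (V, s)).2 ≤ 50)
    ∧
    (∀ (cs : List (Int × Int)) (V : PySem.Set (Int × Int)) (s : Int),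
      cs.Nodup → (∀ c ∈ cs, c ∈ V) → 0 ≤ s → s ≤ 50 → 51 ≤ fuel + s.toNat →
      (pvFillListB w h (PySem.Set.ofList obs) fuel cs (V, s)).2
          = min 50 (s + ((pvR w h obs {x | x ∈ cs} {x | x ∈ V}).ncard : Int))
        ∧ (∀ x ∈ V, x ∈ (pvFillListB w h (PySem.Set.ofList obs) fuel cs (V, s)).1)
        ∧ ((pvFillListB w h (PySem.Set.ofList obs) fuel cs (V, s)).2 < 50 →
            ∀ x, x ∈ (pvFillListB w h (PySem.Set.ofList obs) fuel cs (V, s)).1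
              ↔ x ∈ V ∨ x ∈ pvR w h obs {y | y ∈ cs} {y | y ∈ V})
        ∧ s ≤ (pvFillListB w h (PySem.Set.ofList obs) fuel cs (V, s)).2
        ∧ (pvFillListB w h (PySem.Set.ofList obs) fuel cs (V, s)).2 ≤ 50) := by
  induction fuel with
  | zero =>
    constructor
    · intro c V s hc hs0 hs hf
      exact absurd hf (by omega)
    · intro cs V s hnd hmem hs0 hs hf
      exact absurd hf (by omega)
  | succ f IH =>
    have hfill : ∀ (c : Int × Int) (V : PySem.Set (Int × Int)) (s : Int),
        c ∈ V → 0 ≤ s → s ≤ 50 → 51 ≤ (f + 1) + s.toNat →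
        (pvFillB w h (PySem.Set.ofList obs) (f + 1) c (V, s)).2
            = min 50 (s + ((pvR w h obs {c} {x | x ∈ V}).ncard : Int))
          ∧ (∀ x ∈ V, x ∈ (pvFillB w h (PySem.Set.ofList obs) (f + 1) c (V, s)).1)
          ∧ ((pvFillB w h (PySem.Set.ofList obs) (f + 1) c (V, s)).2 < 50 →
              ∀ x, x ∈ (pvFillB w h (PySem.Set.ofList obs) (f + 1) c (V, s)).1
                ↔ x ∈ V ∨ x ∈ pvR w h obs {c} {y | y ∈ V})
          ∧ s ≤ (pvFillB w h (PySem.Set.ofList obs) (f + 1) c (V, s)).2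
          ∧ (pvFillB w h (PySem.Set.ofList obs) (f + 1) c (V, s)).2 ≤ 50 := by
      intro c V s hc hs0 hs hf
      by_cases hcap : 50 ≤ (((V, s) : PySem.Set (Int × Int) × Int)).2
      · rw [pvFillB, if_pos hcap]
        have hn : (0 : Int) ≤ ((pvR w h obs {c} {x : Int × Int | x ∈ V}).ncard : Int) := by
          positivity
        exact ⟨by omega, fun x hx => hx, by intro hr; omega, le_refl s, hs⟩
      · -- s < 50: count c, flood the fresh neighbours
        have hslt : s < 50 := by simpa using hcap
        set N := (pvNbrList c).filter (fun n => decide (pvOk w h obs n ∧ n ∉ V)) with hNdef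
        have hfold : ((pvNbrList c).foldl
            (fun (p : PySem.Set (Int × Int) × List (Int × Int)) n =>
              if 0 ≤ n.1 ∧ n.1 < w ∧ 0 ≤ n.2 ∧ n.2 < h ∧ n ∉ p.1 ∧ n ∉ PySem.Set.ofList obs
              then (PySem.Set.add p.1 n, p.2 ++ [n]) else p)
            (V, [])) = (V ++ N, [] ++ N) :=
          pvFold_char w h obs
            (fun (Vs : PySem.Set (Int × Int)) (n : Int × Int) =>
              0 ≤ n.1 ∧ n.1 < w ∧ 0 ≤ n.2 ∧ n.2 < h ∧ n ∉ Vs ∧ n ∉ PySem.Set.ofList obs)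
            (by intro Vs n; simp [pvOk, PySem.Set.mem_ofList]; tauto)
            (pvNbrList c) (pvNbrList_nodup c) V []
        rw [List.nil_append] at hfold
        rw [pvFillB, if_neg hcap]
        simp only [hfold]
        have hNmem : ∀ x ∈ N, x ∈ pvNbrList c ∧ pvOk w h obs x ∧ x ∉ V := by
          intro x hx
          have := List.mem_filter.mp hx
          simpa using this
        have hNnd : N.Nodup := List.Nodup.filter _ (pvNbrList_nodup c)
        have hNsubV : ∀ x ∈ N, x ∈ V ++ N := fun x hx => List.mem_append.mpr (Or.inr hx)
        obtain ⟨hcnt2, hsub2, hset2, hmono2, hle2⟩ :=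
          IH.2 N (V ++ N) (s + 1) hNnd hNsubV (by omega) (by omega) (by omega)
        -- identify the sets
        have hS1 : {x : Int × Int | x ∈ N}
            = {n | n ∈ pvNbrList c ∧ pvOk w h obs n ∧ n ∉ V} := by
          ext x
          simp [hNdef, List.mem_filter, Set.mem_setOf_eq]
        have hV1 : {x : Int × Int | x ∈ V ++ N}
            = {x : Int × Int | x ∈ V} ∪ {n | n ∈ pvNbrList c ∧ pvOk w h obs n ∧ n ∉ V} := by
          ext x
          simp [hNdef, List.mem_append, List.mem_filter, Set.mem_setOf_eq, Set.mem_union]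
        rw [hS1, hV1] at hcnt2 hset2
        have hstep := pvR_step w h obs
          (S := (∅ : Set (Int × Int))) (V := {x : Int × Int | x ∈ V}) (c := c)
          hc (Set.notMem_empty c)
        rw [← Set.singleton_def, Set.empty_union] at hstep
        have hfin : (pvR w h obs {n | n ∈ pvNbrList c ∧ pvOk w h obs n ∧ n ∉ V} ({x : Int × Int | x ∈ V} ∪ {n | n ∈ pvNbrList c ∧ pvOk w h obs n ∧ n ∉ V})).Finite := by
          refine pvR_finite w h obs ?_
          rw [← hS1]
          exact List.finite_toSet _
        have hcard : (pvR w h obs {c} {x : Int × Int | x ∈ V}).ncard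
            = (pvR w h obs {n | n ∈ pvNbrList c ∧ pvOk w h obs n ∧ n ∉ V} ({x : Int × Int | x ∈ V} ∪ {n | n ∈ pvNbrList c ∧ pvOk w h obs n ∧ n ∉ V})).ncard + 1 := by
          rw [hstep.1]
          exact Set.ncard_insert_of_notMem hstep.2 hfin
        refine ⟨?_, ?_, ?_, ?_, ?_⟩
        · rw [hcnt2, hcard]
          push_cast
          omega
        · intro x hx
          exact hsub2 x (List.mem_append.mpr (Or.inl hx))
        · intro hr x
          rw [hset2 hr x, hstep.1]
          constructor
          · rintro (hx | hx)
            · rcases List.mem_append.mp hx with hx | hx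
              · exact Or.inl hx
              · exact Or.inr (Set.mem_insert_iff.mpr (Or.inr (pvReach.seed ((hS1 ▸ (Set.mem_setOf_eq ▸ hx)) : _))))
            · exact Or.inr (Set.mem_insert_iff.mpr (Or.inr hx))
          · rintro (hx | hx)
            · exact Or.inl (List.mem_append.mpr (Or.inl hx))
            · rcases Set.mem_insert_iff.mp hx with he | hx
              · exact Or.inl (List.mem_append.mpr (Or.inl (he ▸ hc)))
              · exact Or.inr hx
        · omega
        · exact hle2
    refine ⟨hfill, ?_⟩
    intro cs
    induction cs with
    | nil =>
      intro V s hnd hmem hs0 hs hf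
      rw [pvFillListB]
      have he : ({x : Int × Int | x ∈ ([] : List (Int × Int))}) = (∅ : Set (Int × Int)) := by
        ext x; simp
      rw [he, pvR_empty]
      refine ⟨by simp; omega, fun x hx => hx, ?_, le_refl s, hs⟩
      intro _ x
      simp
    | cons c cs' ihcs =>
      intro V s hnd hmem hs0 hs hf
      rw [pvFillListB]
      obtain ⟨hcnt1, hsub1, hset1, hmono1, hle1⟩ :=
        hfill c V s (hmem c (List.mem_cons_self)) hs0 hs hf
      set st1 := pvFillB w h (PySem.Set.ofList obs) (f + 1) c (V, s) with hst1
      have hpair : pvFillListB w h (PySem.Set.ofList obs) (f + 1) cs' st1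
          = pvFillListB w h (PySem.Set.ofList obs) (f + 1) cs' (st1.1, st1.2) := rfl
      rw [hpair]
      have hcs'V1 : ∀ x ∈ cs', x ∈ st1.1 :=
        fun x hx => hsub1 x (hmem x (List.mem_cons_of_mem c hx))
      obtain ⟨hcnt2, hsub2, hset2, hmono2, hle2⟩ :=
        ihcs st1.1 st1.2 (List.nodup_cons.mp hnd).2 hcs'V1 (by omega) hle1 (by omega)
      have hccs : {x : Int × Int | x ∈ c :: cs'} = {c} ∪ {x : Int × Int | x ∈ cs'} := by
        ext x; simp [List.mem_cons]
      have hsplit := pvR_split w h obs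
        (S := ({c} : Set (Int × Int))) (T := {x : Int × Int | x ∈ cs'})
        (V := {x : Int × Int | x ∈ V})
        (fun x hx => hmem x (List.mem_cons_of_mem c hx))
        (fun x hx hxc => (List.nodup_cons.mp hnd).1 (Set.mem_singleton_iff.mp hxc ▸ hx))
      have hfinc : (pvR w h obs ({c} : Set (Int × Int)) {x : Int × Int | x ∈ V}).Finite :=
        pvR_finite w h obs (Set.finite_singleton c)
      have hfint : (pvR w h obs {x : Int × Int | x ∈ cs'} ({x : Int × Int | x ∈ V} ∪ pvR w h obs {c} {x : Int × Int | x ∈ V})).Finite :=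
        pvR_finite w h obs (List.finite_toSet cs')
      have hfintot : (pvR w h obs {x : Int × Int | x ∈ c :: cs'} {x : Int × Int | x ∈ V}).Finite :=
        pvR_finite w h obs (List.finite_toSet (c :: cs'))
      by_cases hlow : st1.2 < 50
      · -- the fill of c completed below the cap
        have hs1 : st1.2 = s + ((pvR w h obs {c} {x : Int × Int | x ∈ V}).ncard : Int) := by
          omega
        have hVeq : {x : Int × Int | x ∈ st1.1}
            = {x : Int × Int | x ∈ V} ∪ pvR w h obs {c} {x : Int × Int | x ∈ V} := by
          ext x
          simp only [Set.mem_setOf_eq, Set.mem_union]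
          exact hset1 hlow x
        rw [hVeq] at hcnt2 hset2
        have hcard : (pvR w h obs {x : Int × Int | x ∈ c :: cs'} {x : Int × Int | x ∈ V}).ncard
            = (pvR w h obs ({c} : Set (Int × Int)) {x : Int × Int | x ∈ V}).ncard
              + (pvR w h obs {x : Int × Int | x ∈ cs'} ({x : Int × Int | x ∈ V} ∪ pvR w h obs {c} {x : Int × Int | x ∈ V})).ncard := by
          rw [hccs, hsplit.1]
          exact Set.ncard_union_eq (Set.disjoint_right.mpr hsplit.2) hfinc hfint
        refine ⟨?_, ?_, ?_, ?_, ?_⟩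
        · rw [hcnt2, hcard]
          push_cast
          omega
        · intro x hx
          exact hsub2 x (hsub1 x hx)
        · intro hr x
          rw [hset2 hr x, hset1 hlow x, hccs, hsplit.1]
          simp only [Set.mem_union]
          tauto
        · omega
        · exact hle2
      · -- the cap was hit while filling c
        have hs150 : st1.2 = 50 := by omega
        have hge : 50 ≤ s + ((pvR w h obs {c} {x : Int × Int | x ∈ V}).ncard : Int) := by
          omega
        have hmonoc : (pvR w h obs ({c} : Set (Int × Int)) {x : Int × Int | x ∈ V}).ncard
            ≤ (pvR w h obs {x : Int × Int | x ∈ c :: cs'} {x : Int × Int | x ∈ V}).ncard := by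
          refine Set.ncard_le_ncard (pvR_mono w h obs ?_) hfintot
          intro x hx
          simp only [Set.mem_setOf_eq]
          rw [Set.mem_singleton_iff.mp hx]
          exact List.mem_cons_self
        refine ⟨by omega, fun x hx => hsub2 x (hsub1 x hx), by intro hr; omega, by omega, hle2⟩

-- ===== VERDICT (by name: the statement is the Claim_ definition above) =====
theorem evaluate_move_space_spec : Claim_equal_evaluate_move_space := by
  intro nx ny w h obstacles _
  unfold Spec_evaluate_move_space evaluate_move_space evaluate_move_space_alt
  have hV : PySem.Set.add PySem.Set.empty ((nx, ny) : Int × Int) = [(nx, ny)] := rfl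
  rw [hV]
  have hA := pvBfsA_char w h obstacles [(nx, ny)] [(nx, ny)] 0
    (by intro c hc; exact hc) (by simp) (by omega) (by omega)
  have hB := (pvFillB_char w h obstacles 51).1 (nx, ny) [(nx, ny)] 0
    (by simp) (by omega) (by omega) (by omega)
  rw [hA, hB.1]
  have hs : {x : Int × Int | x ∈ [(nx, ny)]} = ({(nx, ny)} : Set (Int × Int)) := by
    ext x; simp
  rw [hs]
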